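-- pv_equiv track=rewrite | github.com/premkumar6/labtest2 | apriori-algo.py | stage_k
-- ===== SOURCE A (Python) =====
-- from itertools import combinations
--
-- def stage_k(items,records, minimum_support_count,k):
--     combi=list(combinations(items,k))
--     ck = {}
--     lk={}
--
--     for iter1 in combi:
--         count = 0
--         for iter2 in records:
--             if set(iter1).issubset(set(iter2[1])):
--                 count+=1
--         ck[iter1] = count
--
--     for key, value in ck.items():
--         if value >= minimum_support_count:
--             lk[key] = value
--
--     return ck, lk
-- ===== SOURCE B (Python) =====
-- from itertools import combinations
--
-- def stage_k(items, records, minimum_support_count, k):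
--     combos = list(combinations(items, k))
--     ck = {c: 0 for c in combos}
--     for record in records:
--         rs = set(record[1])
--         present = [x for x in items if x in rs]
--         for c in dict.fromkeys(combinations(present, k)):
--             ck[c] += 1
--     lk = {c: v for c, v in ck.items() if v >= minimum_support_count}
--     return ck, lk
-- ===== Notes on version B (the rewrite author's own statement) =====
-- stated objective: alternative
-- what changed: Instead of scanning all records (rebuilding their sets) for every k-combination, B precomputes each record's set once, initialises every combination's count to 0, and per record increments only the deduplicated k-combinations drawn from the items present in that record.
import Mathlib
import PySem

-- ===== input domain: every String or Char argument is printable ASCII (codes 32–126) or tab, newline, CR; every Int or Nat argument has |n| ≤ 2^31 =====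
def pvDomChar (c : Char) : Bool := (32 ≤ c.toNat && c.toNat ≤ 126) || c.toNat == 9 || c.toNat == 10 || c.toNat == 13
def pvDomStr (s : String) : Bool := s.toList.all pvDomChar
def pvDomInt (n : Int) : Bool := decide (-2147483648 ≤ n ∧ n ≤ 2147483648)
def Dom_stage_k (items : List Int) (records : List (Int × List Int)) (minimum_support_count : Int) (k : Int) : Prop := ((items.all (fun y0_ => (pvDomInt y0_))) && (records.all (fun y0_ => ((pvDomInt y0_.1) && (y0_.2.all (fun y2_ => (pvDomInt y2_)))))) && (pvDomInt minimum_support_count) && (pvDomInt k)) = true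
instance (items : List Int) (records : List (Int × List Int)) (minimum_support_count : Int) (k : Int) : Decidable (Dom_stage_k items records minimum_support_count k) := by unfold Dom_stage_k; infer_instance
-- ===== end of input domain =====

-- B counts per record instead of per combination: it initialises every k-combination to 0 and, for each record,
-- increments only the (deduplicated) k-combinations drawn from the items present in that record; return value
-- identical to A's.

-- itertools.combinations(l, k) (tuples in l's position order), as lists
def pyCombinations : List Int → Nat → List (List Int)
  | _, 0 => [[]]
  | [], _ + 1 => []
  | x :: xs, k + 1 => (pyCombinations xs k).map (fun c => x :: c) ++ pyCombinations xs (k + 1)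

-- ===== PORT A =====
def stage_k (items : List Int) (records : List (Int × List Int)) (minimum_support_count : Int) (k : Int) : (List (List Int × Int)) × (List (List Int × Int)) :=
  let combi := pyCombinations items k.toNat
  let ck := combi.foldl (fun d iter1 =>
      d.insert iter1 (records.foldl (fun count iter2 =>
        if PySem.Set.issubset (PySem.Set.ofList iter1) (PySem.Set.ofList iter2.2) then count + 1 else count) (0 : Int)))
    PySem.Dict.empty
  let lk := ck.items.foldl (fun d p => if p.2 ≥ minimum_support_count then d.insert p.1 p.2 else d) PySem.Dict.empty
  (ck.items, lk.items)

-- ===== PORT B =====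
def stage_k_alt (items : List Int) (records : List (Int × List Int)) (minimum_support_count : Int) (k : Int) : (List (List Int × Int)) × (List (List Int × Int)) :=
  let combos := pyCombinations items k.toNat
  let ck0 : PySem.Dict (List Int) Int := combos.foldl (fun d c => d.insert c 0) PySem.Dict.empty
  let ck := records.foldl (fun d record =>
      let rs := PySem.Set.ofList record.2
      let present := items.filter (fun x => PySem.Set.contains rs x)
      (PySem.List.dedup (pyCombinations present k.toNat)).foldl (fun d c => d.modify c 0 (· + 1)) d)
    ck0
  let lk := PySem.Dict.ofList (ck.items.filter (fun p => decide (p.2 ≥ minimum_support_count)))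
  (ck.items, lk.items)

-- ===== PRECONDITION & SPEC =====
-- Python's combinations(items, k) raises ValueError for k < 0; both A and B raise there.
def Pre_stage_k (items : List Int) (records : List (Int × List Int)) (minimum_support_count : Int) (k : Int) : Prop := 0 ≤ k
instance (items : List Int) (records : List (Int × List Int)) (minimum_support_count : Int) (k : Int) : Decidable (Pre_stage_k items records minimum_support_count k) := by unfold Pre_stage_k; infer_instance
def pvWitness_stage_k : List Int × (List (Int × List Int)) × Int × Int := ([1, 2, 3], [(0, [1, 2]), (1, [2, 3])], 1, 2)

def Spec_stage_k (items : List Int) (records : List (Int × List Int)) (minimum_support_count : Int) (k : Int) (out : (List (List Int × Int)) × (List (List Int × Int))) : Prop := out = stage_k_alt items records minimum_support_count k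
instance (items : List Int) (records : List (Int × List Int)) (minimum_support_count : Int) (k : Int) (out : (List (List Int × Int)) × (List (List Int × Int))) : Decidable (Spec_stage_k items records minimum_support_count k out) := by unfold Spec_stage_k; infer_instance

-- ===== CLAIM (what is proved, stated in full; the proofs are below) =====
def Claim_equal_stage_k : Prop := ∀ (items : List Int) (records : List (Int × List Int)) (minimum_support_count : Int) (k : Int), Dom_stage_k items records minimum_support_count k → Pre_stage_k items records minimum_support_count k → Spec_stage_k items records minimum_support_count k (stage_k items records minimum_support_count k)

-- ===== LEMMAS AND PROOFS =====

theorem items_empty : (PySem.Dict.empty : PySem.Dict (List Int) Int).items = [] := rfl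

-- membership in pyCombinations = "sublist of length k"
theorem mem_pyCombinations (l : List Int) (k : Nat) (c : List Int) :
    c ∈ pyCombinations l k ↔ c.Sublist l ∧ c.length = k := by
  induction l generalizing k c with
  | nil =>
    cases k with
    | zero => simp [pyCombinations, List.sublist_nil]
    | succ k =>
      simp only [pyCombinations, List.not_mem_nil, false_iff]
      rintro ⟨hs, hl⟩
      simp [List.sublist_nil] at hs
      subst hs; simp at hl
  | cons x xs ih =>
    cases k with
    | zero =>
      simp only [pyCombinations, List.mem_singleton]
      constructor
      · rintro rfl; exact ⟨List.nil_sublist _, rfl⟩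
      · rintro ⟨-, hl⟩; exact List.eq_nil_of_length_eq_zero hl
    | succ k =>
      simp only [pyCombinations, List.mem_append, List.mem_map]
      constructor
      · rintro (⟨c', hc', rfl⟩ | h)
        · obtain ⟨hs, hl⟩ := (ih k c').mp hc'
          exact ⟨List.Sublist.cons₂ x hs, by simp [hl]⟩
        · obtain ⟨hs, hl⟩ := (ih (k + 1) c).mp h
          exact ⟨hs.cons x, hl⟩
      · rintro ⟨hs, hl⟩
        rcases List.sublist_cons_iff.mp hs with h | ⟨r, rfl, hr⟩
        · exact Or.inr ((ih (k + 1) c).mpr ⟨h, hl⟩)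
        · exact Or.inl ⟨r, (ih k r).mpr ⟨hr, by simpa using hl⟩, rfl⟩

theorem sublist_filter_iff (p : Int → Bool) (l c : List Int) :
    c.Sublist (l.filter p) ↔ c.Sublist l ∧ ∀ x ∈ c, p x = true := by
  constructor
  · intro h
    exact ⟨h.trans List.filter_sublist, fun x hx => (List.mem_filter.mp (h.subset hx)).2⟩
  · rintro ⟨hs, hp⟩
    induction hs with
    | slnil => simp
    | cons y hs ih =>
      refine (ih hp).trans ?_
      by_cases hy : p y = true <;> simp [List.filter_cons, hy, List.Sublist.cons]
    | @cons₂ c' l' y hs ih =>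
      have hy : p y = true := hp y (by simp)
      rw [List.filter_cons_of_pos hy]
      exact (ih (fun x hx => hp x (by simp [hx]))).cons₂ y

-- the characteristic predicate of combination c under record r (as A tests it)
theorem mem_combos_filter (items : List Int) (kn : Nat) (c : List Int) (r : List Int)
    (hc : c ∈ pyCombinations items kn) :
    (c ∈ pyCombinations (items.filter (fun x => PySem.Set.contains (PySem.Set.ofList r) x)) kn)
      ↔ (∀ x ∈ c, x ∈ r) := by
  obtain ⟨hs, hl⟩ := (mem_pyCombinations items kn c).mp hc
  rw [mem_pyCombinations, sublist_filter_iff]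
  constructor
  · rintro ⟨⟨-, hp⟩, -⟩ x hx
    have := hp x hx
    rw [PySem.Set.contains_iff, PySem.Set.mem_ofList] at this
    exact this
  · intro h
    exact ⟨⟨hs, fun x hx => by rw [PySem.Set.contains_iff, PySem.Set.mem_ofList]; exact h x hx⟩, hl⟩

-- a counting foldl is countP
theorem foldl_if_count (p : (Int × List Int) → Bool) (l : List (Int × List Int)) (a : Int) :
    l.foldl (fun count r => if p r then count + 1 else count) a = a + l.countP p := by
  induction l generalizing a with
  | nil => simp
  | cons r l ih =>
    simp only [List.foldl_cons, List.countP_cons, ih]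
    by_cases h : p r = true <;> simp [h] <;> push_cast <;> omega

-- lookup in a fold of inserts whose value depends only on the key
theorem getD_foldl_insert_fun (f : List Int → Int) (l : List (List Int)) (d : PySem.Dict (List Int) Int) (v : List Int) :
    (l.foldl (fun d c => d.insert c (f c)) d).getD v 0 = if v ∈ l then f v else d.getD v 0 := by
  induction l generalizing d with
  | nil => simp
  | cons c cs ih =>
    simp only [List.foldl_cons, ih, PySem.Dict.getD_insert]
    by_cases h1 : v ∈ cs <;> by_cases h2 : v = c <;> simp [h1, h2]

-- dedup counts each member exactly once
theorem count_ofList (l : List (List Int)) (v : List Int) :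
    List.count v (PySem.Set.ofList l) = if v ∈ l then 1 else 0 := by
  by_cases h : v ∈ l
  · rw [if_pos h]
    exact List.count_eq_one_of_mem (PySem.Set.nodup_ofList l) ((PySem.Set.mem_ofList l v).mpr h)
  · rw [if_neg h]
    exact List.count_eq_zero.mpr (fun hm => h ((PySem.Set.mem_ofList l v).mp hm))

-- updating a set with elements it already has changes nothing
theorem set_update_of_subset (s : PySem.Set (List Int)) (l : List (List Int)) (h : ∀ x ∈ l, x ∈ s) :
    PySem.Set.update s l = s := by
  induction l generalizing s with
  | nil => rfl
  | cons x xs ih =>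
    have hx : PySem.Set.add s x = s := by
      unfold PySem.Set.add
      rw [if_pos ((PySem.Set.contains_iff s x).mpr (h x (by simp)))]
    show PySem.Set.update (PySem.Set.add s x) xs = s
    rw [hx]; exact ih s (fun y hy => h y (by simp [hy]))

-- B's record loop: the value at v grows by the number of records whose combination list contains v
theorem B_loop_getD (step : (Int × List Int) → List (List Int)) (rs : List (Int × List Int))
    (d : PySem.Dict (List Int) Int) (v : List Int) :
    (rs.foldl (fun d r => (PySem.List.dedup (step r)).foldl (fun d c => d.modify c 0 (· + 1)) d) d).getD v 0
      = d.getD v 0 + rs.countP (fun r => decide (v ∈ step r)) := by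
  induction rs generalizing d with
  | nil => simp
  | cons r rs ih =>
    rw [List.foldl_cons, ih, PySem.Dict.getD_foldl_modify_add_one, PySem.List.dedup_eq_ofList,
      count_ofList, List.countP_cons]
    by_cases h : v ∈ step r <;> simp [h] <;> push_cast <;> omega

-- keys of B's record loop stay the keys of the initial dict when every touched key is already present
theorem keys_B_loop (step : (Int × List Int) → List (List Int)) (rs : List (Int × List Int))
    (d : PySem.Dict (List Int) Int) (h : ∀ r ∈ rs, ∀ c ∈ step r, c ∈ d.keys) :
    (rs.foldl (fun d r => (PySem.List.dedup (step r)).foldl (fun d c => d.modify c 0 (· + 1)) d) d).keys = d.keys := by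
  induction rs generalizing d with
  | nil => rfl
  | cons r rs ih =>
    simp only [List.foldl_cons]
    have hk : ((PySem.List.dedup (step r)).foldl (fun d c => d.modify c 0 (· + 1)) d).keys = d.keys := by
      have := PySem.Dict.keys_foldl_modify (PySem.List.dedup (step r)) 0 (fun _ _ => (· + 1)) d
      rw [this, set_update_of_subset]
      intro x hx
      exact h r (by simp) x ((PySem.List.mem_dedup _ x).mp hx)
    rw [ih _ (fun r' hr' c hc => by rw [hk]; exact h r' (by simp [hr']) c hc), hk]

-- a conditional-insert fold over fresh distinct keys appends exactly the filtered pairs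
theorem items_foldl_insert_if (msc : Int) (L : List (List Int × Int)) (d : PySem.Dict (List Int) Int)
    (hf : ∀ q ∈ L, d.contains q.1 = false) (hn : (L.map Prod.fst).Nodup) :
    (L.foldl (fun d p => if p.2 ≥ msc then d.insert p.1 p.2 else d) d).items
      = d.items ++ L.filter (fun p => decide (p.2 ≥ msc)) := by
  induction L generalizing d with
  | nil => simp
  | cons q L ih =>
    simp only [List.map_cons, List.nodup_cons] at hn
    by_cases hq : q.2 ≥ msc
    · rw [List.foldl_cons, if_pos hq, List.filter_cons]
      rw [ih (d.insert q.1 q.2)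
        (fun p hp => by
          rw [PySem.Dict.contains_insert]
          have h1 : (p.1 == q.1) = false := by
            simp only [beq_eq_false_iff_ne, ne_eq]
            intro he
            exact hn.1 (he ▸ List.mem_map_of_mem hp)
          simp [h1, hf p (by simp [hp])])
        hn.2]
      rw [PySem.Dict.items_insert_of_not_contains _ _ (hf q (by simp))]
      simp [hq]
    · rw [List.foldl_cons, if_neg hq, List.filter_cons]
      rw [ih d (fun p hp => hf p (by simp [hp])) hn.2]
      simp [hq]

-- a fold of key-determined inserts from empty: items are the deduped keys paired with their values
theorem items_foldl_insert_fun (f : List Int → Int) (l : List (List Int)) :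
    (l.foldl (fun d c => d.insert c (f c)) (PySem.Dict.empty : PySem.Dict (List Int) Int)).items
      = (PySem.Set.ofList l).map (fun c => (c, f c)) := by
  have hk : (l.foldl (fun d c => d.insert c (f c)) (PySem.Dict.empty : PySem.Dict (List Int) Int)).keys
      = PySem.Set.ofList l := by
    have := PySem.Dict.keys_foldl_insert l (fun _ c => f c) (PySem.Dict.empty : PySem.Dict (List Int) Int)
    rwa [PySem.Dict.keys_empty, PySem.Set.update_nil_left] at this
  have hn : (l.foldl (fun d c => d.insert c (f c)) (PySem.Dict.empty : PySem.Dict (List Int) Int)).keys.Nodup := by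
    exact PySem.Dict.nodup_keys_foldl_insert l (fun _ c => f c) _ (by simp [PySem.Dict.keys_empty])
  rw [PySem.Dict.items_eq_map_keys _ hn 0, hk]
  refine List.map_congr_left (fun c hc => ?_)
  rw [getD_foldl_insert_fun f l _ c, if_pos ((PySem.Set.mem_ofList l c).mp hc)]

-- ===== VERDICT (by name: the statement is the Claim_ definition above) =====
theorem stage_k_spec : Claim_equal_stage_k := by
  intro items records msc k _ _
  show _ = stage_k_alt items records msc k
  unfold stage_k stage_k_alt
  simp only []
  set kn := k.toNat with hkn
  set combi := pyCombinations items kn with hcombi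
  -- A's per-combination count
  set fA : List Int → Int := fun c => records.foldl (fun count iter2 =>
      if PySem.Set.issubset (PySem.Set.ofList c) (PySem.Set.ofList iter2.2) then count + 1 else count) 0 with hfA
  -- B's per-record combination list
  set step : (Int × List Int) → List (List Int) := fun r =>
      pyCombinations (items.filter (fun x => PySem.Set.contains (PySem.Set.ofList r.2) x)) kn with hstep
  have hstepmem : ∀ (r : Int × List Int), ∀ c ∈ step r, c ∈ combi := by
    intro r c hc
    obtain ⟨hs, hl⟩ := (mem_pyCombinations _ kn c).mp hc
    exact (mem_pyCombinations items kn c).mpr ⟨hs.trans List.filter_sublist, hl⟩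
  -- the two count functions agree on combinations
  have hcount : ∀ c ∈ combi,
      fA c = (records.countP (fun r => decide (c ∈ step r)) : Int) := by
    intro c hc
    rw [hfA]
    simp only []
    rw [foldl_if_count (fun iter2 =>
      PySem.Set.issubset (PySem.Set.ofList c) (PySem.Set.ofList iter2.2)) records 0, zero_add]
    congr 1
    refine List.countP_congr (fun r _ => ?_)
    simp only [decide_eq_true_eq, PySem.Set.issubset_iff, PySem.Set.mem_ofList]
    rw [mem_combos_filter items kn c r.2 hc]
  -- A's dict items
  have hA : (combi.foldl (fun d iter1 => d.insert iter1 (records.foldl (fun count iter2 =>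
        if PySem.Set.issubset (PySem.Set.ofList iter1) (PySem.Set.ofList iter2.2) then count + 1 else count) 0))
        PySem.Dict.empty).items = (PySem.Set.ofList combi).map (fun c => (c, fA c)) :=
    items_foldl_insert_fun fA combi
  -- B's dict
  set ck0 : PySem.Dict (List Int) Int := combi.foldl (fun d c => d.insert c 0) PySem.Dict.empty with hck0
  have hk0 : ck0.keys = PySem.Set.ofList combi := by
    rw [hck0]
    have := PySem.Dict.keys_foldl_insert combi (fun _ _ => (0 : Int)) (PySem.Dict.empty : PySem.Dict (List Int) Int)
    rwa [PySem.Dict.keys_empty, PySem.Set.update_nil_left] at this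
  have hg0 : ∀ v, ck0.getD v 0 = 0 := by
    intro v
    rw [hck0]
    rw [getD_foldl_insert_fun (fun _ => 0) combi _ v]
    split <;> simp
  set ckB := records.foldl (fun d record =>
      (PySem.List.dedup (pyCombinations (items.filter (fun x =>
        PySem.Set.contains (PySem.Set.ofList record.2) x)) kn)).foldl (fun d c => d.modify c 0 (· + 1)) d) ck0 with hckB
  have hckB' : ckB = records.foldl (fun d r =>
      (PySem.List.dedup (step r)).foldl (fun d c => d.modify c 0 (· + 1)) d) ck0 := rfl
  have hkB : ckB.keys = PySem.Set.ofList combi := by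
    rw [hckB', keys_B_loop step records ck0
      (fun r _ c hc => by rw [hk0]; exact (PySem.Set.mem_ofList _ _).mpr (hstepmem r c hc)), hk0]
  have hnB : ckB.keys.Nodup := by rw [hkB]; exact PySem.Set.nodup_ofList _
  have hgB : ∀ v, ckB.getD v 0 = (records.countP (fun r => decide (v ∈ step r)) : Int) := by
    intro v
    rw [hckB', B_loop_getD step records ck0 v, hg0 v, zero_add]
  have hB : ckB.items = (PySem.Set.ofList combi).map (fun c => (c, fA c)) := by
    rw [PySem.Dict.items_eq_map_keys ckB hnB 0, hkB]
    refine List.map_congr_left (fun c hc => ?_)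
    rw [hgB c, hcount c ((PySem.Set.mem_ofList _ _).mp hc)]
  -- first components agree
  have h1 : (combi.foldl (fun d iter1 => d.insert iter1 (records.foldl (fun count iter2 =>
        if PySem.Set.issubset (PySem.Set.ofList iter1) (PySem.Set.ofList iter2.2) then count + 1 else count) 0))
        PySem.Dict.empty).items = ckB.items := by rw [hA, hB]
  -- second components
  have hnodupfst : (ckB.items.map Prod.fst).Nodup := hnB
  have h2A : ((combi.foldl (fun d iter1 => d.insert iter1 (records.foldl (fun count iter2 =>
        if PySem.Set.issubset (PySem.Set.ofList iter1) (PySem.Set.ofList iter2.2) then count + 1 else count) 0))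
        PySem.Dict.empty).items.foldl (fun d p => if p.2 ≥ msc then d.insert p.1 p.2 else d)
        (PySem.Dict.empty : PySem.Dict (List Int) Int)).items
      = ckB.items.filter (fun p => decide (p.2 ≥ msc)) := by
    rw [h1]
    rw [items_foldl_insert_if msc ckB.items PySem.Dict.empty (fun q _ => by simp) hnodupfst]
    simp [items_empty]
  have h2B : (PySem.Dict.ofList (ckB.items.filter (fun p => decide (p.2 ≥ msc)))).items
      = ckB.items.filter (fun p => decide (p.2 ≥ msc)) := by
    have hsub : ((ckB.items.filter (fun p => decide (p.2 ≥ msc))).map Prod.fst).Nodup :=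
      ((List.filter_sublist).map Prod.fst).nodup hnodupfst
    have := PySem.Dict.items_foldl_insert_fresh (ckB.items.filter (fun p => decide (p.2 ≥ msc)))
      Prod.fst Prod.snd (PySem.Dict.empty : PySem.Dict (List Int) Int) (fun a _ => by simp) hsub
    rw [show (PySem.Dict.ofList (ckB.items.filter (fun p => decide (p.2 ≥ msc)))) =
      ((ckB.items.filter (fun p => decide (p.2 ≥ msc))).foldl
        (fun d a => d.insert a.1 a.2) (PySem.Dict.empty : PySem.Dict (List Int) Int)) from rfl]
    rw [this]
    simp [items_empty]
  rw [Prod.mk.injEq]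
  exact ⟨h1, by rw [h2A, h2B]⟩
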